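-- pv_equiv track=rewrite | github.com/rbxo0128/code | 프로그래머스/2/12914. 멀리 뛰기/멀리 뛰기.py | solution
-- ===== SOURCE A (Python) =====
-- def solution(n):
--     if n == 1:
--         return 1
--     dp = [0 for i in range(n)]
--     dp[0] = 1
--     dp[1] = 2
--     for i in range(2,n):
--         dp[i] = (dp[i-2]+dp[i-1]) % 1234567
--
--
--     return dp[n-1]
-- ===== SOURCE B (Python) =====
-- def solution(n):
--     MOD = 1234567
--     def fd(k):
--         # returns (F(k) % MOD, F(k+1) % MOD) by Fibonacci fast doubling
--         if k == 0:
--             return (0, 1)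
--         a, b = fd(k // 2)
--         c = a * (2 * b - a) % MOD
--         d = (a * a + b * b) % MOD
--         if k % 2 == 0:
--             return (c, d)
--         else:
--             return (d, (c + d) % MOD)
--     return fd(n + 1)[0]
-- ===== Notes on version B (the rewrite author's own statement) =====
-- stated objective: faster
-- what changed: replaces the O(n) DP array over all indices by recursive Fibonacci fast doubling mod 1234567, computing F(n+1) % 1234567 in O(log n) multiplications
-- outside the precondition, e.g. on solution(0): A raises IndexError, B returns 1
import Mathlib
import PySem

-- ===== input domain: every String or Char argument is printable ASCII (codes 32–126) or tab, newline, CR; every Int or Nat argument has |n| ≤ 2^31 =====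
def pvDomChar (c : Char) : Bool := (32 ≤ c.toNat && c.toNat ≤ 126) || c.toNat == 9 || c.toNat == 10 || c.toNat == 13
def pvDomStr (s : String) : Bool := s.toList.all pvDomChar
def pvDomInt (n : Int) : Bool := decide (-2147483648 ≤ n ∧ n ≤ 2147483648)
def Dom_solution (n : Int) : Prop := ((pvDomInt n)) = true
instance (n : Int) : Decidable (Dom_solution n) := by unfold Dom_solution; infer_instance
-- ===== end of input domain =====

-- B replaces A's O(n) DP array by recursive Fibonacci fast doubling mod 1234567 (O(log n)).

-- ===== PORT A =====
-- Python's list is array-backed with O(1) dp[i] = v, so dp is an Array Int; the loop indices i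
-- run over range(2, n), hence 2 ≤ i and the (i-2).toNat/(i-1).toNat reads are exact there.
def solution (n : Int) : Int :=
  if n == 1 then 1
  else
    let dp : Array Int := ((PySem.List.pyRange 0 n 1).map (fun _ => (0:Int))).toArray  -- [0 for i in range(n)]
    let dp := dp.set! 0 1                                        -- dp[0] = 1
    let dp := dp.set! 1 2                                        -- dp[1] = 2
    let dp := (PySem.List.pyRange 2 n 1).foldl                   -- for i in range(2, n):
      (fun dp i => dp.set! i.toNat
        (PySem.Int.mod (dp.getD (i-2).toNat 0 + dp.getD (i-1).toNat 0) 1234567))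
      dp
    PySem.List.pyGetD dp.toList (n-1) 0                          -- return dp[n-1]

-- ===== PORT B =====
-- fd(k) = (F(k) % 1234567, F(k+1) % 1234567) by fast doubling; k // 2 and k % 2 are Nat // and % (k ≥ 0 here)
def fdAux (k : Nat) : Int × Int :=
  if _h : k = 0 then (0, 1)
  else
    let p := fdAux (k / 2)
    let a := p.1
    let b := p.2
    let c := PySem.Int.mod (a * (2 * b - a)) 1234567
    let d := PySem.Int.mod (a * a + b * b) 1234567
    if k % 2 = 0 then (c, d) else (d, PySem.Int.mod (c + d) 1234567)
decreasing_by exact Nat.div_lt_self (Nat.pos_of_ne_zero _h) one_lt_two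

def solution_alt (n : Int) : Int := (fdAux (n + 1).toNat).1

-- ===== PRECONDITION & SPEC =====
-- Pre_ excludes n ≤ 0, on which A raises IndexError (dp[0] = 1 on an empty list).
def Pre_solution (n : Int) : Prop := 1 ≤ n
instance (n : Int) : Decidable (Pre_solution n) := by unfold Pre_solution; infer_instance
def pvWitness_solution : Int := (5)

def Spec_solution (n : Int) (out : Int) : Prop := out = solution_alt n
instance (n : Int) (out : Int) : Decidable (Spec_solution n out) := by unfold Spec_solution; infer_instance

-- ===== CLAIM (what is proved, stated in full; the proofs are below) =====
def Claim_equal_solution : Prop := ∀ (n : Int), Dom_solution n → Pre_solution n → Spec_solution n (solution n)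

-- ===== LEMMAS AND PROOFS =====

-- g k = F(k) mod 1234567; f k = dp[k] = F(k+2) mod 1234567
def pvG (k : Nat) : Int := (Nat.fib k : Int) % 1234567

def pvF (k : Nat) : Int := pvG (k + 2)

def pvStep (dp : Array Int) (i : Int) : Array Int :=
  dp.set! i.toNat
    (PySem.Int.mod (dp.getD (i-2).toNat 0 + dp.getD (i-1).toNat 0) 1234567)

def pvDp2 (n : Int) : Array Int :=
  ((((PySem.List.pyRange 0 n 1).map (fun _ => (0:Int))).toArray).set! 0 1).set! 1 2

lemma pvMod_eq (a : Int) : PySem.Int.mod a 1234567 = a % 1234567 :=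
  PySem.Int.mod_eq_emod_of_pos (by norm_num)

-- ----- B side: fast doubling computes pvG -----

lemma pvFibCastMul (q : Nat) :
    (Nat.fib (2 * q) : Int) = (Nat.fib q : Int) * (2 * (Nat.fib (q + 1) : Int) - (Nat.fib q : Int)) := by
  have hle : Nat.fib q ≤ 2 * Nat.fib (q + 1) :=
    le_trans (Nat.fib_le_fib_succ) (by omega)
  rw [Nat.fib_two_mul q]
  push_cast [Nat.cast_sub hle]
  ring

lemma pvC_eq (q : Nat) : (pvG q * (2 * pvG (q + 1) - pvG q)) % 1234567 = pvG (2 * q) := by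
  simp only [pvG, pvFibCastMul q]
  simp [Int.mul_emod, Int.sub_emod]

lemma pvD_eq (q : Nat) : (pvG q * pvG q + pvG (q + 1) * pvG (q + 1)) % 1234567 = pvG (2 * q + 1) := by
  simp only [pvG, Nat.fib_two_mul_add_one, pow_two]
  push_cast
  rw [add_comm ((Nat.fib (q+1) : Int) * _)]
  simp [Int.add_emod, Int.mul_emod]

lemma pvCD_eq (q : Nat) : (pvG (2 * q) + pvG (2 * q + 1)) % 1234567 = pvG (2 * q + 2) := by
  simp only [pvG]
  rw [show 2*q+2 = (2*q) + 2 from rfl, Nat.fib_add_two]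
  push_cast
  simp [Int.add_emod]

lemma fdAux_eq (k : Nat) : fdAux k = (pvG k, pvG (k + 1)) := by
  induction k using Nat.strong_induction_on with
  | _ k ih =>
    rw [fdAux]
    by_cases h0 : k = 0
    · simp [h0, pvG]
    · simp only [h0, dite_false]
      rw [ih (k / 2) (Nat.div_lt_self (Nat.pos_of_ne_zero h0) one_lt_two)]
      set q := k / 2 with hq
      rcases Nat.even_or_odd k with he | ho
      · have hk2 : k % 2 = 0 := Nat.even_iff.mp he
        have hk : k = 2 * q := by omega
        simp only [hk2, if_true, pvMod_eq]
        rw [pvC_eq, pvD_eq, hk]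
      · have hk2 : k % 2 = 1 := Nat.odd_iff.mp ho
        have hk : k = 2 * q + 1 := by omega
        simp only [hk2, one_ne_zero, if_false, pvMod_eq]
        rw [pvC_eq, pvD_eq, pvCD_eq, hk]

lemma solution_alt_eq (n : Int) (hn : 0 ≤ n) : solution_alt n = pvG (n.toNat + 1) := by
  unfold solution_alt
  rw [show (n + 1).toNat = n.toNat + 1 by omega, fdAux_eq]

-- ----- A side: the dp loop fills the array with pvF -----

lemma pvF_rec (a : Nat) : (pvF a + pvF (a + 1)) % 1234567 = pvF (a + 2) := by
  simp only [pvF, pvG]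
  conv_rhs => rw [show a+2+2 = (a+2)+2 from rfl, Nat.fib_add_two]
  push_cast
  rw [show a+1+2 = a+2+1 by omega]
  simp [Int.add_emod]

lemma pvDp2_size (N : Nat) : (pvDp2 (N : Int)).size = N := by
  simp [pvDp2, Array.set!, PySem.List.length_pyRange_one]

lemma pvDp2_get0 (N : Nat) (hN : 2 ≤ N) : (pvDp2 (N : Int)).getD 0 0 = pvF 0 := by
  rw [pvDp2, Array.getD_eq_getD_getElem?]
  simp [Array.set!, PySem.List.length_pyRange_one, show 0 < N by omega]
  decide

lemma pvDp2_get1 (N : Nat) (hN : 2 ≤ N) : (pvDp2 (N : Int)).getD 1 0 = pvF 1 := by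
  rw [pvDp2, Array.getD_eq_getD_getElem?]
  simp [Array.set!, PySem.List.length_pyRange_one, show 1 < N by omega]
  decide

lemma pvInv (N : Nat) (hN : 2 ≤ N) (j : Nat) (h2 : 2 ≤ j) (hj : j ≤ N) :
    ((PySem.List.pyRange 2 (j : Int) 1).foldl pvStep (pvDp2 (N : Int))).size = N ∧
    ∀ k, k < j → ((PySem.List.pyRange 2 (j : Int) 1).foldl pvStep (pvDp2 (N : Int))).getD k 0 = pvF k := by
  induction j with
  | zero => omega
  | succ j ihj =>
    by_cases hj2 : j < 2
    · have hj1 : j = 1 := by omega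
      subst hj1
      rw [show ((2:Nat):Int) = 2 from rfl, PySem.List.pyRange_one_eq_nil (by norm_num)]
      simp only [List.foldl_nil]
      refine ⟨pvDp2_size N, ?_⟩
      intro k hk
      interval_cases k
      · exact pvDp2_get0 N hN
      · exact pvDp2_get1 N hN
    · have h2j : 2 ≤ j := by omega
      obtain ⟨hlen, hval⟩ := ihj h2j (by omega)
      have hsplit : PySem.List.pyRange 2 ((j:Nat)+1 : Int) 1
          = PySem.List.pyRange 2 (j : Int) 1 ++ [(j:Int)] :=
        PySem.List.pyRange_one_succ_right (by exact_mod_cast h2j.trans (by omega))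
      rw [show (((j+1 : Nat)):Int) = ((j:Nat):Int) + 1 by push_cast; ring, hsplit,
        List.foldl_append]
      simp only [List.foldl_cons, List.foldl_nil]
      set R := (PySem.List.pyRange 2 (j : Int) 1).foldl pvStep (pvDp2 (N : Int)) with hR
      have hjN : j < N := by omega
      have hget2 : R.getD ((j:Int)-2).toNat 0 = pvF (j - 2) := by
        rw [show ((j:Int) - 2).toNat = j - 2 by omega]
        exact hval (j-2) (by omega)
      have hget1 : R.getD ((j:Int)-1).toNat 0 = pvF (j - 1) := by
        rw [show ((j:Int) - 1).toNat = j - 1 by omega]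
        exact hval (j-1) (by omega)
      have hmod : PySem.Int.mod (pvF (j-2) + pvF (j-1)) 1234567 = pvF j := by
        rw [pvMod_eq, show j - 1 = (j-2) + 1 by omega, pvF_rec (j-2), show j-2+2 = j by omega]
      have hstep : pvStep R (j:Int) = R.set! j (pvF j) := by
        simp only [pvStep, hget2, hget1, hmod, Int.toNat_natCast]
      rw [hstep]
      refine ⟨by simp [Array.set!, hlen], ?_⟩
      intro k hk
      rw [Array.getD_eq_getD_getElem?]
      simp only [Array.set!, Array.getElem?_setIfInBounds]
      by_cases hkj : k = j
      · subst hkj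
        rw [if_pos rfl, if_pos (by omega)]
        rfl
      · rw [if_neg (fun h => hkj h.symm), ← Array.getD_eq_getD_getElem?]
        exact hval k (by omega)

-- ===== VERDICT (by name: the statement is the Claim_ definition above) =====
theorem solution_spec : Claim_equal_solution := by
  intro n _ hpre
  unfold Spec_solution
  by_cases h1 : n = 1
  · subst h1
    unfold solution solution_alt
    rw [show ((1:Int) + 1).toNat = 2 from rfl, fdAux_eq]
    decide
  · have h2 : 2 ≤ n := by
      unfold Pre_solution at hpre; omega
    set N := n.toNat with hNdef
    have hnN : n = (N : Int) := by omega
    have hN2 : 2 ≤ N := by omega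
    obtain ⟨hlen, hval⟩ := pvInv N hN2 N hN2 le_rfl
    unfold solution
    rw [if_neg (by simp [h1]), hnN]
    show PySem.List.pyGetD
      (((PySem.List.pyRange 2 ((N:Int)) 1).foldl pvStep (pvDp2 (N : Int))).toList) ((N:Int) - 1) 0
      = solution_alt ((N:Int))
    rw [show ((N:Int) - 1) = ((N - 1 : Nat) : Int) by omega, PySem.List.pyGetD_natCast,
      List.getD_eq_getElem?_getD, Array.getElem?_toList, ← Array.getD_eq_getD_getElem?,
      hval (N-1) (by omega), solution_alt_eq _ (by omega)]
    simp only [pvF, pvG, Int.toNat_natCast]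
    rw [show N - 1 + 2 = N + 1 by omega]
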